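-- pv_equiv track=rewrite | github.com/ribalda/everybodycodes | 2025/13/step1_2_3.py | get_value_at
-- ===== SOURCE A (Python) =====
-- def get_value_at(wheel, length, offset, pos):
--     pos += offset
--     pos %= length
--     for r in wheel:
--         l = len(r)
--         if pos >= l:
--             pos -= l
--             continue
--         return r[pos]
--
--     return None
-- ===== SOURCE B (Python) =====
-- def get_value_at(wheel, length, offset, pos):
--     flat = [c for r in wheel for c in r]
--     pos = (pos + offset) % length
--     return flat[pos] if pos < len(flat) else None
-- ===== Notes on version B (the rewrite author's own statement) =====
-- stated objective: simpler
-- what changed: B flattens all wheel rows into one concatenated sequence and indexes it directly, replacing A's loop that walks rows subtracting each row length from the position.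
-- outside the precondition, e.g. on get_value_at(['ab', 'cd'], -4, 0, -1): A returns 'b', B returns 'd'; on get_value_at([], 0, 0, 0): A raises ZeroDivisionError, B raises ZeroDivisionError
import Mathlib
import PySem

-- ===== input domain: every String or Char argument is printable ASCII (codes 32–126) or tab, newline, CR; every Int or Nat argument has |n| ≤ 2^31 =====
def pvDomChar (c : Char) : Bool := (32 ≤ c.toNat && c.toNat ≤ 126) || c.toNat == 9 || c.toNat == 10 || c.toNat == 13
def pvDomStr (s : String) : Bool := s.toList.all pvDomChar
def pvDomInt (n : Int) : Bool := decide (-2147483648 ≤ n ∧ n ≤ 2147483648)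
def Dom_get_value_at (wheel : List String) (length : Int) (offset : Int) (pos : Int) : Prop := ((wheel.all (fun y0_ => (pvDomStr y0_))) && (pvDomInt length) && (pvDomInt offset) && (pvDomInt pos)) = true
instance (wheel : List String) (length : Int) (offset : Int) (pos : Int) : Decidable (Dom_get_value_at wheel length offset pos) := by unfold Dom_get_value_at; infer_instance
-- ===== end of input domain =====

-- B replaces A's row-walking loop by indexing a single flattened sequence of all rows (objective: simpler).

-- ===== PORT A =====
-- the 'for r in wheel' loop: carries the running position, subtracting each skipped row's length
def get_value_at_loop : List String → Int → Option String
  | [], _ => none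
  | r :: rs, pos =>
    let l := PySem.Str.len r
    if pos ≥ l then get_value_at_loop rs (pos - l)
    else (PySem.Str.pyGet? r pos).map String.singleton

def get_value_at (wheel : List String) (length : Int) (offset : Int) (pos : Int) : Option String :=
  let pos1 := pos + offset
  let pos2 := PySem.Int.mod pos1 length
  get_value_at_loop wheel pos2

-- ===== PORT B =====
def get_value_at_alt (wheel : List String) (length : Int) (offset : Int) (pos : Int) : Option String :=
  let flat : List Char := wheel.foldl (fun acc r => acc ++ r.toList) []
  let pos2 := PySem.Int.mod (pos + offset) length
  if pos2 < (flat.length : Int) then (PySem.List.pyGet? flat pos2).map String.singleton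
  else none

-- ===== PRECONDITION & SPEC =====
-- Pre_ excludes length = 0 (A raises ZeroDivisionError) and negative lengths whose normalized
-- position is negative, where A's value comes from Python's negative-index wraparound inside the
-- first row (or an IndexError when that row is empty) — an artefact of A's implementation.
def Pre_get_value_at (wheel : List String) (length : Int) (offset : Int) (pos : Int) : Prop :=
  length ≠ 0 ∧ 0 ≤ PySem.Int.mod (pos + offset) length
instance (wheel : List String) (length : Int) (offset : Int) (pos : Int) : Decidable (Pre_get_value_at wheel length offset pos) := by unfold Pre_get_value_at; infer_instance

def pvWitness_get_value_at : List String × Int × Int × Int := (["abc", "de"], 4, 1, 2)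

def Spec_get_value_at (wheel : List String) (length : Int) (offset : Int) (pos : Int) (out : Option String) : Prop := out = get_value_at_alt wheel length offset pos
instance (wheel : List String) (length : Int) (offset : Int) (pos : Int) (out : Option String) : Decidable (Spec_get_value_at wheel length offset pos out) := by unfold Spec_get_value_at; infer_instance

-- ===== CLAIM (what is proved, stated in full; the proofs are below) =====
def Claim_equal_get_value_at : Prop := ∀ (wheel : List String) (length : Int) (offset : Int) (pos : Int), Dom_get_value_at wheel length offset pos → Pre_get_value_at wheel length offset pos → Spec_get_value_at wheel length offset pos (get_value_at wheel length offset pos)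

-- ===== LEMMAS AND PROOFS =====

theorem foldl_append_toList (ws : List String) (acc : List Char) :
    ws.foldl (fun acc r => acc ++ r.toList) acc = acc ++ ws.flatMap String.toList := by
  induction ws generalizing acc with
  | nil => simp
  | cons r rs ih => simp [List.foldl_cons, ih, List.append_assoc]

theorem loop_eq_flat (ws : List String) (m : Int) (hm : 0 ≤ m) :
    get_value_at_loop ws m =
      if m < ((ws.flatMap String.toList).length : Int)
      then (PySem.List.pyGet? (ws.flatMap String.toList) m).map String.singleton
      else none := by
  induction ws generalizing m with
  | nil =>
    simp [get_value_at_loop]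
    omega
  | cons r rs ih =>
    simp only [get_value_at_loop, PySem.Str.len_eq, List.flatMap_cons, List.length_append]
    by_cases h : m ≥ (r.toList.length : Int)
    · rw [if_pos h, ih (m - r.toList.length) (by omega)]
      rw [PySem.List.pyGet?_of_nonneg _ hm, PySem.List.pyGet?_of_nonneg _ (by omega : (0:Int) ≤ m - r.toList.length)]
      rw [List.getElem?_append_right (by omega : r.toList.length ≤ m.toNat)]
      have : m.toNat - r.toList.length = (m - ↑r.toList.length).toNat := by omega
      rw [this]
      split_ifs with h1 h2 h2 <;> try rfl
      · omega
      · omega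
    · rw [if_neg h, if_pos (by push_cast; omega)]
      have hlist : PySem.Str.pyGet? r m = PySem.List.pyGet? r.toList m := by
        simp [PySem.Str.pyGet?, PySem.Chars.pyGet?_eq_listPyGet?]
      rw [hlist, PySem.List.pyGet?_of_nonneg _ hm, PySem.List.pyGet?_of_nonneg _ hm]
      rw [List.getElem?_append_left (by omega : m.toNat < r.toList.length)]

-- ===== VERDICT (by name: the statement is the Claim_ definition above) =====
theorem get_value_at_spec : Claim_equal_get_value_at := by
  intro wheel length offset pos _ hpre
  obtain ⟨hne, hnn⟩ := hpre
  unfold Spec_get_value_at get_value_at get_value_at_alt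
  rw [foldl_append_toList wheel [], List.nil_append]
  exact loop_eq_flat wheel _ hnn
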